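-- pv_equiv track=rewrite | github.com/yoots50/Python-Programmers | programmers_기능개발.py | solution
-- ===== SOURCE A (Python) =====
-- def solution(progresses, speeds):
--     lst = []
--     day = 1
--     answer = []
--     for num in range(len(progresses)):
--         while progresses[num]+speeds[num]*day<100:
--             day += 1
--         else:
--             lst.append(day)
--     for i in range(len(lst)-1):
--         if lst[i] > lst[i+1]:
--             lst[i+1] = lst[i]
--     lst1 = list(set(lst))
--     lst1.sort()
--     for i in lst1:
--         answer.append(lst.count(i))
--     return answer
-- ===== SOURCE B (Python) =====
-- def solution(progresses, speeds):
--     answer = []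
--     m = 1       # running maximum of completion days so far (day counter starts at 1)
--     cur = 0     # size of the current deployment group
--     for p, s in zip(progresses, speeds):
--         d = max(1, -((p - 100) // s))   # ceil((100 - p) / s), at least day 1
--         if d > m:
--             if cur:
--                 answer.append(cur)
--             m = d
--             cur = 1
--         else:
--             cur += 1
--     if cur:
--         answer.append(cur)
--     return answer
-- ===== Notes on version B (the rewrite author's own statement) =====
-- stated objective: faster
-- what changed: Replaces the simulated day-by-day while loop, the in-place max-propagation pass and the per-distinct-value lst.count scans over the whole list with a closed-form ceiling division plus a running maximum and a single pass that counts contiguous deployment groups.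
-- outside the precondition, e.g. on solution([150], [0]): A returns [1], B raises ZeroDivisionError; on solution([200, 110], [-50, -1]): A returns [2], B returns [1, 1]
import Mathlib
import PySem

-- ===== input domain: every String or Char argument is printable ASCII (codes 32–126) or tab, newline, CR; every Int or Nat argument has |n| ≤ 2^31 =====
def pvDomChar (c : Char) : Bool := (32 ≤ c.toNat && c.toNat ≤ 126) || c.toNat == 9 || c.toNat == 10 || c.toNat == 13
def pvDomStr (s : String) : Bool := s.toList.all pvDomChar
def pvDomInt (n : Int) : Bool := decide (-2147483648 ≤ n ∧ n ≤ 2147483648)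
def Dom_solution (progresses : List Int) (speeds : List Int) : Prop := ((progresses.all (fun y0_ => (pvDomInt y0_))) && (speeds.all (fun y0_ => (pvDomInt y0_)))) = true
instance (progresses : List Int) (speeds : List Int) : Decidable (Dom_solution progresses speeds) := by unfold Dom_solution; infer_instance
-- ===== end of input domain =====

-- B replaces A's day-by-day while-loop simulation, in-place propagation pass and per-distinct-value
-- count scans by a closed-form ceiling division with a running maximum and one group-counting pass (faster).


-- ===== PORT A =====
-- 'while progresses[num]+speeds[num]*day < 100: day += 1', with a structural fuel bound that only
-- makes the recursion total; under Pre_ every speed used is ≥ 1 and the fuel is proved sufficient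
-- (whileDayA_eq below), so the loop runs exactly as Python's (Python loops forever when s ≤ 0).
def whileGo (p : Int) (s : Int) : Nat → Int → Int
  | 0, day => day
  | fuel + 1, day => if p + s * day < 100 then whileGo p s fuel (day + 1) else day

def whileDayA (p : Int) (s : Int) (day : Int) : Int :=
  whileGo p s ((100 - p - s * day).toNat + 1) day

def solution (progresses : List Int) (speeds : List Int) : List Int :=
  -- first loop: for num in range(len(progresses)): while …; lst.append(day)
  let st := (PySem.List.pyRange 0 (PySem.List.len progresses) 1).foldl
    (fun (st : Int × List Int) num =>
      let day := whileDayA (PySem.List.pyGetD progresses num 0) (PySem.List.pyGetD speeds num 0) st.1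
      (day, st.2 ++ [day])) (1, [])
  let lst := st.2
  -- second loop: for i in range(len(lst)-1): if lst[i] > lst[i+1]: lst[i+1] = lst[i]
  let lst2 := (PySem.List.pyRange 0 (PySem.List.len lst - 1) 1).foldl
    (fun l i =>
      if PySem.List.pyGetD l i 0 > PySem.List.pyGetD l (i + 1) 0
      then PySem.List.pySetD l (i + 1) (PySem.List.pyGetD l i 0) else l) lst
  -- lst1 = list(set(lst)); lst1.sort()  (sorted, so independent of set iteration order)
  let lst1 := PySem.List.sorted (PySem.Set.ofList lst2) (fun x => x) false
  -- for i in lst1: answer.append(lst.count(i))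
  lst1.foldl (fun (answer : List Int) i => answer ++ [(PySem.List.count lst2 i : Int)]) []

-- ===== PORT B =====
-- loop body of B: state (m, cur, answer)
def stepB (st : Int × Int × List Int) (ps : Int × Int) : Int × Int × List Int :=
  let d := max 1 (-(PySem.Int.floordiv (ps.1 - 100) ps.2))
  if d > st.1 then (d, 1, if st.2.1 ≠ 0 then st.2.2 ++ [st.2.1] else st.2.2)
  else (st.1, st.2.1 + 1, st.2.2)

def solution_alt (progresses : List Int) (speeds : List Int) : List Int :=
  let st := (progresses.zip speeds).foldl stepB (1, 0, [])
  if st.2.1 ≠ 0 then st.2.2 ++ [st.2.1] else st.2.2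

-- ===== PRECONDITION & SPEC =====
-- Pre_ restricts to the problem's guaranteed domain: speeds at least as long as progresses and every
-- used speed ≥ 1. Outside it A raises IndexError (speeds too short) or, with a nonpositive speed,
-- almost always loops forever; its occasional terminating results there (already-finished tasks with
-- zero or negative speed) are accidental, and B's ceiling division raises or differs on them.
def Pre_solution (progresses : List Int) (speeds : List Int) : Prop :=
  progresses.length ≤ speeds.length ∧ ∀ x ∈ List.take progresses.length speeds, 1 ≤ x
instance (progresses : List Int) (speeds : List Int) : Decidable (Pre_solution progresses speeds) := by
  unfold Pre_solution; infer_instance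
def pvWitness_solution : List Int × List Int := ([93, 30, 55], [1, 30, 5])

def Spec_solution (progresses : List Int) (speeds : List Int) (out : List Int) : Prop := out = solution_alt progresses speeds
instance (progresses : List Int) (speeds : List Int) (out : List Int) : Decidable (Spec_solution progresses speeds out) := by unfold Spec_solution; infer_instance

-- ===== CLAIM (what is proved, stated in full; the proofs are below) =====
def Claim_equal_solution : Prop := ∀ (progresses : List Int) (speeds : List Int), Dom_solution progresses speeds → Pre_solution progresses speeds → Spec_solution progresses speeds (solution progresses speeds)

-- ===== LEMMAS AND PROOFS =====

-- ceil((100 - p) / s), the closed form B computes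
def cdiv (p : Int) (s : Int) : Int := -(PySem.Int.floordiv (p - 100) s)

-- the list of deployment days as A's first loop produces it (running day counter m)
def dayList (m : Int) : List (Int × Int) → List Int
  | [] => []
  | (p, s) :: t => (max m (cdiv p s)) :: dayList (max m (cdiv p s)) t

-- run-length encoding of a day list (B's grouping)
def runGo (prev : Int) (cur : Int) : List Int → List Int
  | [] => [cur]
  | d :: t => if prev < d then cur :: runGo d 1 t else runGo d (cur + 1) t

def runLen : List Int → List Int
  | [] => []
  | x :: t => runGo x 1 t

-- distinct values of a nondecreasing list, in order
def sdd : List Int → List Int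
  | [] => []
  | x :: t => x :: sdd (t.dropWhile (fun y => x = y))
termination_by l => l.length
decreasing_by
  simp only [List.length_cons]
  exact Nat.lt_succ_of_le (List.length_dropWhile_le _ _)

lemma cdiv_le_iff (p s d : Int) (hs : 0 < s) : cdiv p s ≤ d ↔ 100 ≤ p + s * d := by
  unfold cdiv
  rw [neg_le, PySem.Int.le_floordiv_iff_mul_le hs]
  constructor <;> intro h <;> nlinarith

lemma whileGo_eq (p s : Int) (hs : 1 ≤ s) :
    ∀ (n : Nat) (day : Int), (100 - p - s * day).toNat < n →
    whileGo p s n day = max day (cdiv p s) := by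
  intro n
  induction n with
  | zero => intro day hle; omega
  | succ n ih =>
    intro day hle
    rw [whileGo]
    by_cases hlt : p + s * day < 100
    · rw [if_pos hlt]
      have hring : s * (day + 1) = s * day + s := by ring
      rw [ih (day + 1) (by omega)]
      have h1 : ¬ cdiv p s ≤ day := fun hc => by
        have := (cdiv_le_iff p s day (by omega)).1 hc; omega
      omega
    · rw [if_neg hlt]
      have := (cdiv_le_iff p s day (by omega)).2 (by omega)
      omega

lemma whileDayA_eq (p s day : Int) (hs : 1 ≤ s) : whileDayA p s day = max day (cdiv p s) :=
  whileGo_eq p s hs ((100 - p - s * day).toNat + 1) day (Nat.lt_succ_self _)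

lemma dayList_le (pairs : List (Int × Int)) : ∀ m : Int, ∀ x ∈ dayList m pairs, m ≤ x := by
  induction pairs with
  | nil => intro m x hx; simp [dayList] at hx
  | cons q t ih =>
    obtain ⟨p, s⟩ := q
    intro m x hx
    simp only [dayList, List.mem_cons] at hx
    rcases hx with rfl | hx
    · exact le_max_left _ _
    · exact le_trans (le_max_left _ _) (ih _ x hx)

lemma dayList_pairwise (pairs : List (Int × Int)) : ∀ m : Int, List.Pairwise (· ≤ ·) (dayList m pairs) := by
  induction pairs with
  | nil => intro m; simp [dayList]
  | cons q t ih =>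
    obtain ⟨p, s⟩ := q
    intro m
    simp only [dayList]
    exact List.pairwise_cons.mpr ⟨fun x hx => dayList_le t _ x hx, ih _⟩

lemma dayList_append (xs : List (Int × Int)) (qp qs : Int) : ∀ m : Int,
    dayList m (xs ++ [(qp, qs)]) =
      dayList m xs ++ [max ((dayList m xs).getLastD m) (cdiv qp qs)] := by
  induction xs with
  | nil => intro m; simp [dayList]
  | cons r t ih =>
    obtain ⟨p, s⟩ := r
    intro m
    simp only [List.cons_append, dayList, ih, List.getLastD_cons]

lemma getLastD_concat' (l : List Int) (x d : Int) : (l ++ [x]).getLastD d = x := by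
  induction l generalizing d with
  | nil => rfl
  | cons a t ih => rw [List.cons_append, List.getLastD_cons, ih]

lemma foldl_fixed {α β : Type} (f : α → β → α) (L : α) :
    ∀ r : List β, (∀ i ∈ r, f L i = L) → r.foldl f L = L := by
  intro r
  induction r with
  | nil => intro _; rfl
  | cons x t ih =>
    intro h
    rw [List.foldl_cons, h x (by simp)]
    exact ih (fun i hi => h i (by simp [hi]))

lemma foldA (ps ss : List Int) (hlen : ps.length ≤ ss.length)
    (hs : ∀ x ∈ List.take ps.length ss, 1 ≤ x) :
    ∀ k : Nat, k ≤ ps.length →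
    (PySem.List.pyRange 0 (k : Int) 1).foldl
      (fun (st : Int × List Int) num =>
        (whileDayA (PySem.List.pyGetD ps num 0) (PySem.List.pyGetD ss num 0) st.1,
         st.2 ++ [whileDayA (PySem.List.pyGetD ps num 0) (PySem.List.pyGetD ss num 0) st.1]))
      (1, []) =
    ((dayList 1 ((ps.zip ss).take k)).getLastD 1, dayList 1 ((ps.zip ss).take k)) := by
  intro k
  induction k with
  | zero =>
    intro _
    rw [show ((0 : Nat) : Int) = 0 from rfl, PySem.List.pyRange_one_eq_nil le_rfl]
    simp [dayList]
  | succ k ih =>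
    intro hk
    have hk' : k ≤ ps.length := Nat.le_of_succ_le hk
    have hkp : k < ps.length := hk
    have hks : k < ss.length := lt_of_lt_of_le hkp hlen
    have hzl : k < (ps.zip ss).length := by rw [List.length_zip]; omega
    have hcast : ((k + 1 : Nat) : Int) = (k : Int) + 1 := by push_cast; ring
    rw [hcast, PySem.List.pyRange_one_succ_right (Int.natCast_nonneg k), List.foldl_append,
      ih hk', List.foldl_cons, List.foldl_nil]
    have hget_p : PySem.List.pyGetD ps ((k : Nat) : Int) 0 = ps[k] := by
      rw [PySem.List.pyGetD_natCast]; exact List.getD_eq_getElem ps 0 hkp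
    have hget_s : PySem.List.pyGetD ss ((k : Nat) : Int) 0 = ss[k] := by
      rw [PySem.List.pyGetD_natCast]; exact List.getD_eq_getElem ss 0 hks
    have hkt : k < (List.take ps.length ss).length := by
      rw [List.length_take]; omega
    have hsk : 1 ≤ ss[k] := by
      have hmem : ss[k] ∈ List.take ps.length ss := by
        have he := List.getElem_take (xs := ss) (j := ps.length) (i := k) (h := hkt)
        exact he ▸ List.getElem_mem hkt
      exact hs _ hmem
    have htake : (ps.zip ss).take (k + 1) = (ps.zip ss).take k ++ [(ps[k], ss[k])] := by
      rw [List.take_add_one, List.getElem?_eq_getElem hzl, List.getElem_zip]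
      rfl
    rw [htake, dayList_append, hget_p, hget_s, whileDayA_eq _ _ _ hsk, getLastD_concat']

lemma prop_fixed (L : List Int) (hL : List.Pairwise (· ≤ ·) L) :
    (PySem.List.pyRange 0 ((L.length : Int) - 1) 1).foldl
      (fun l i =>
        if PySem.List.pyGetD l i 0 > PySem.List.pyGetD l (i + 1) 0
        then PySem.List.pySetD l (i + 1) (PySem.List.pyGetD l i 0) else l) L = L := by
  apply foldl_fixed
  intro i hi
  rw [PySem.List.mem_pyRange_one] at hi
  obtain ⟨h0, h1⟩ := hi
  have hlen : i < (L.length : Int) - 1 := h1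
  have e1 : PySem.List.pyGetD L i 0 = L[i.toNat] :=
    PySem.List.pyGetD_eq_getElem L 0 h0 (by omega)
  have e2 : PySem.List.pyGetD L (i + 1) 0 = L[(i + 1).toNat] :=
    PySem.List.pyGetD_eq_getElem L 0 (by omega) (by omega)
  have ht : (i + 1).toNat = i.toNat + 1 := by omega
  have hle : L[i.toNat] ≤ L[(i + 1).toNat] := by
    simp only [ht]
    exact List.pairwise_iff_getElem.1 hL i.toNat (i.toNat + 1) (by omega) (by omega) (by omega)
  rw [e1, e2, if_neg (not_lt.mpr hle)]

lemma runGo_skip (x : Int) : ∀ (tw : List Int), (∀ y ∈ tw, y = x) →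
    ∀ (cur : Int) (rest : List Int),
    runGo x cur (tw ++ rest) = runGo x (cur + (tw.length : Int)) rest := by
  intro tw
  induction tw with
  | nil => intro _ cur rest; simp
  | cons y r ih =>
    intro h cur rest
    have hy : y = x := h y (by simp)
    subst hy
    simp only [List.cons_append, runGo, if_neg (lt_irrefl y)]
    rw [ih (fun z hz => h z (by simp [hz])) (cur + 1)]
    congr 1
    simp only [List.length_cons]
    push_cast
    ring

-- the joint induction: membership, strict sortedness and counts of sdd on a nondecreasing list
lemma sdd_main : ∀ (n : Nat) (l : List Int), l.length ≤ n → List.Pairwise (· ≤ ·) l →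
    (∀ x ∈ sdd l, x ∈ l) ∧ (∀ x ∈ l, x ∈ sdd l) ∧ List.Pairwise (· < ·) (sdd l) ∧
    (sdd l).map (fun v => ((List.count v l : Nat) : Int)) = runLen l := by
  intro n
  induction n with
  | zero =>
    intro l hl _
    have : l = [] := List.length_eq_zero_iff.mp (Nat.le_zero.mp hl)
    subst this
    refine ⟨by simp [sdd], by simp, by simp [sdd], by simp [sdd, runLen]⟩
  | succ n ih =>
    intro l hl hpw
    cases l with
    | nil => refine ⟨by simp [sdd], by simp, by simp [sdd], by simp [sdd, runLen]⟩
    | cons x t =>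
      obtain ⟨hx, hpt⟩ := List.pairwise_cons.mp hpw
      have hpdw : List.Pairwise (· ≤ ·) (t.dropWhile (fun y => decide (x = y))) :=
        List.Pairwise.sublist (List.dropWhile_sublist _) hpt
      have htw : ∀ y ∈ t.takeWhile (fun y => decide (x = y)), x = y := by
        intro y hy
        have := List.mem_takeWhile_imp hy
        simpa using this
      have hgt : ∀ y ∈ t.dropWhile (fun y => decide (x = y)), x < y := by
        intro y hy
        have hyt : y ∈ t := (List.dropWhile_sublist _).mem hy
        rcases eq_or_lt_of_le (hx y hyt) with heq | h'
        · exfalso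
          cases hdw : t.dropWhile (fun y => decide (x = y)) with
          | nil => rw [hdw] at hy; exact absurd hy (List.not_mem_nil)
          | cons w r =>
            have hne : ¬ (x = w) := by
              have hhd := List.head_dropWhile_not (fun y => decide (x = y)) (l := t)
                (by rw [hdw]; simp)
              simp only [hdw, List.head_cons] at hhd
              simpa using hhd
            have hwt : w ∈ t := (List.dropWhile_sublist _).mem (by rw [hdw]; simp)
            have hxw : x ≤ w := hx w hwt
            have hpwr : List.Pairwise (· ≤ ·) (w :: r) := hdw ▸ hpdw
            rw [hdw] at hy
            rcases List.mem_cons.mp hy with hywe | hyr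
            · exact hne (heq.trans hywe)
            · have hwy : w ≤ y := (List.pairwise_cons.mp hpwr).1 y hyr
              exact hne (le_antisymm hxw (hwy.trans heq.symm.le))
        · exact h'
      have hlen' : (t.dropWhile (fun y => decide (x = y))).length ≤ n := by
        have h1 := List.length_dropWhile_le (fun y => decide (x = y)) t
        simp only [List.length_cons] at hl
        omega
      obtain ⟨ihsub, ihmem, ihpw, ihcount⟩ := ih _ hlen' hpdw
      have hsddeq : sdd (x :: t) = x :: sdd (t.dropWhile (fun y => decide (x = y))) := by
        rw [sdd]
      refine ⟨?_, ?_, ?_, ?_⟩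
      · -- subset
        intro y hy
        rw [hsddeq] at hy
        rcases List.mem_cons.mp hy with rfl | hy'
        · exact List.mem_cons_self
        · exact List.mem_cons_of_mem _ ((List.dropWhile_sublist _).mem (ihsub y hy'))
      · -- completeness
        intro y hy
        rw [hsddeq]
        rcases List.mem_cons.mp hy with rfl | hyt
        · exact List.mem_cons_self
        · conv at hyt => rw [← List.takeWhile_append_dropWhile
            (p := fun y => decide (x = y)) (l := t)]
          rcases List.mem_append.mp hyt with h' | h'
          · exact (htw y h') ▸ List.mem_cons_self
          · exact List.mem_cons_of_mem _ (ihmem y h')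
      · -- strict pairwise
        rw [hsddeq]
        exact List.pairwise_cons.mpr ⟨fun y hy => hgt y (ihsub y hy), ihpw⟩
      · -- counts
        have hcx : List.count x (x :: t) =
            (t.takeWhile (fun y => decide (x = y))).length + 1 := by
          rw [List.count_cons_self]
          congr 1
          conv_lhs => rw [← List.takeWhile_append_dropWhile
            (p := fun y => decide (x = y)) (l := t)]
          rw [List.count_append]
          have h1 : List.count x (t.takeWhile (fun y => decide (x = y))) =
              (t.takeWhile (fun y => decide (x = y))).length :=
            List.count_eq_length.mpr (fun b hb => htw b hb)
          have h2 : List.count x (t.dropWhile (fun y => decide (x = y))) = 0 :=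
            List.count_eq_zero.mpr (fun hxd => lt_irrefl x (hgt x hxd))
          omega
        have hcv : ∀ v ∈ sdd (t.dropWhile (fun y => decide (x = y))),
            List.count v (x :: t) = List.count v (t.dropWhile (fun y => decide (x = y))) := by
          intro v hv
          have hvd := ihsub v hv
          have hxv : x < v := hgt v hvd
          have hnvx : x ≠ v := ne_of_lt hxv
          have hstep : List.count v (x :: t) = List.count v t := by
            simp [hnvx]
          rw [hstep]
          conv_lhs => rw [← List.takeWhile_append_dropWhile
            (p := fun y => decide (x = y)) (l := t)]
          rw [List.count_append]
          have h0 : List.count v (t.takeWhile (fun y => decide (x = y))) = 0 :=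
            List.count_eq_zero.mpr (fun hvtw => (ne_of_gt hxv) (htw v hvtw).symm)
          omega
        rw [hsddeq, List.map_cons]
        have hrl : runLen (x :: t) = runGo x 1 t := by rw [runLen]
        rw [hrl]
        conv_rhs => rw [← List.takeWhile_append_dropWhile
          (p := fun y => decide (x = y)) (l := t)]
        rw [runGo_skip x _ (fun y hy => (htw y hy).symm) 1]
        cases hdw : t.dropWhile (fun y => decide (x = y)) with
        | nil =>
          simp only [sdd, runGo, List.map_nil, List.cons.injEq, and_true]
          rw [hcx]
          push_cast
          ring
        | cons w r =>
          have hxw : x < w := hgt w (by rw [hdw]; simp)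
          rw [runGo, if_pos hxw]
          congr 1
          · rw [hcx]; push_cast; ring
          · have hmapeq : (sdd (t.dropWhile (fun y => decide (x = y)))).map
                (fun v => ((List.count v (x :: t) : Nat) : Int)) =
                (sdd (t.dropWhile (fun y => decide (x = y)))).map
                (fun v => ((List.count v (t.dropWhile (fun y => decide (x = y))) : Nat) : Int)) :=
              List.map_congr_left (fun v hv => by rw [hcv v hv])
            rw [hdw] at hmapeq ihcount
            rw [hmapeq, ihcount, runLen]

lemma sorted_set_eq_sdd (L : List Int) (h : List.Pairwise (· ≤ ·) L) :
    PySem.List.sorted (PySem.Set.ofList L) (fun x => x) false = sdd L := by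
  obtain ⟨hsub, hmem, hpw, _⟩ := sdd_main L.length L le_rfl h
  apply PySem.List.sorted_eq_of_perm_of_pairwise_lt
  · rw [List.perm_ext_iff_of_nodup (List.Pairwise.imp (fun h => ne_of_lt h) hpw)
      (PySem.Set.nodup_ofList L)]
    intro a
    rw [PySem.Set.mem_ofList]
    exact ⟨hsub a, hmem a⟩
  · exact hpw

lemma foldB : ∀ (pairs : List (Int × Int)) (m cur : Int) (ans : List Int), 1 ≤ m → 1 ≤ cur →
    (let st := pairs.foldl stepB (m, cur, ans)
     if st.2.1 ≠ 0 then st.2.2 ++ [st.2.1] else st.2.2)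
    = ans ++ runGo m cur (dayList m pairs) := by
  intro pairs
  induction pairs with
  | nil =>
    intro m cur ans _ hcur
    simp only [List.foldl_nil]
    rw [if_pos (by omega : cur ≠ 0)]
    rfl
  | cons q t ih =>
    obtain ⟨p, s⟩ := q
    intro m cur ans hm hcur
    rw [List.foldl_cons]
    by_cases hbr : max 1 (cdiv p s) > m
    · have hstep : stepB (m, cur, ans) (p, s) = (cdiv p s, 1, ans ++ [cur]) := by
        simp only [stepB]
        rw [show -(PySem.Int.floordiv (p - 100) s) = cdiv p s from rfl]
        rw [if_pos hbr, if_pos (by omega : cur ≠ 0)]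
        have hc : max 1 (cdiv p s) = cdiv p s := by omega
        rw [hc]
      rw [hstep, ih _ _ _ (by omega) le_rfl]
      have hmc : max m (cdiv p s) = cdiv p s := by omega
      simp only [dayList, hmc]
      rw [runGo, if_pos (by omega : m < cdiv p s), List.append_assoc]
      rfl
    · have hstep : stepB (m, cur, ans) (p, s) = (m, cur + 1, ans) := by
        simp only [stepB]
        rw [show -(PySem.Int.floordiv (p - 100) s) = cdiv p s from rfl]
        rw [if_neg hbr]
      rw [hstep, ih _ _ _ hm (by omega)]
      have hmc : max m (cdiv p s) = m := by omega
      simp only [dayList, hmc]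
      rw [runGo, if_neg (lt_irrefl m)]

lemma alt_eq (ps ss : List Int) :
    solution_alt ps ss = runLen (dayList 1 (ps.zip ss)) := by
  simp only [solution_alt]
  cases hz : ps.zip ss with
  | nil => simp [dayList, runLen]
  | cons q t =>
    obtain ⟨p, s⟩ := q
    rw [List.foldl_cons]
    have hstep : stepB (1, 0, ([] : List Int)) (p, s) = (max 1 (cdiv p s), 1, []) := by
      simp only [stepB]
      rw [show -(PySem.Int.floordiv (p - 100) s) = cdiv p s from rfl]
      by_cases h : max 1 (cdiv p s) > (1 : Int)
      · rw [if_pos h]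
        norm_num
      · rw [if_neg h]
        have h1 : max 1 (cdiv p s) = 1 := by omega
        rw [h1]
        norm_num
    rw [hstep, foldB t _ _ _ (le_max_left _ _) le_rfl]
    simp only [dayList, runLen]
    rw [List.nil_append]

-- ===== VERDICT (by name: the statement is the Claim_ definition above) =====
theorem solution_spec : Claim_equal_solution := by
  unfold Claim_equal_solution
  intro ps ss _ hpre
  obtain ⟨hlen, hs⟩ := hpre
  unfold Spec_solution
  rw [alt_eq]
  have hfold := foldA ps ss hlen hs ps.length le_rfl
  have htf : (ps.zip ss).take ps.length = ps.zip ss :=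
    List.take_of_length_le (by rw [List.length_zip]; omega)
  rw [htf] at hfold
  have hpw : List.Pairwise (· ≤ ·) (dayList 1 (ps.zip ss)) := dayList_pairwise _ _
  simp only [solution, PySem.List.len_eq]
  rw [hfold]
  simp only []
  rw [prop_fixed _ hpw]
  rw [PySem.List.foldl_append_singleton_eq_map
    (f := fun i => ((PySem.List.count (dayList 1 (ps.zip ss)) i : Nat) : Int))]
  rw [List.nil_append, sorted_set_eq_sdd _ hpw]
  simp only [PySem.List.count_eq]
  exact (sdd_main (dayList 1 (ps.zip ss)).length _ le_rfl hpw).2.2.2
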